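-- pv_equiv track=rewrite | github.com/Christon-Ragavan/CAMAT | music_xml_parser/core/plot.py | _create_sparse_rep
-- ===== SOURCE A (Python) =====
-- def _create_sparse_rep(dlist):
--     n_sparse = []
--     for i, m in enumerate(dlist):
--         if i == 0:
--             n_sparse.append(1)
--         else:
--             if m != dlist[i - 1]:
--                 n_sparse.append(1)
--             else:
--                 n_sparse.append(0)
--     return n_sparse
-- ===== SOURCE B (Python) =====
-- from itertools import groupby
--
-- def _create_sparse_rep(dlist):
--     out = []
--     for _, grp in groupby(dlist):
--         k = sum(1 for _ in grp)
--         out.append(1)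
--         out.extend([0] * (k - 1))
--     return out
-- ===== Notes on version B (the rewrite author's own statement) =====
-- stated objective: idiomatic
-- what changed: Replaces the per-index predecessor comparison with an itertools.groupby run-grouping traversal: each maximal run of equal values contributes one 1 followed by len-1 zeros.
import Mathlib
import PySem

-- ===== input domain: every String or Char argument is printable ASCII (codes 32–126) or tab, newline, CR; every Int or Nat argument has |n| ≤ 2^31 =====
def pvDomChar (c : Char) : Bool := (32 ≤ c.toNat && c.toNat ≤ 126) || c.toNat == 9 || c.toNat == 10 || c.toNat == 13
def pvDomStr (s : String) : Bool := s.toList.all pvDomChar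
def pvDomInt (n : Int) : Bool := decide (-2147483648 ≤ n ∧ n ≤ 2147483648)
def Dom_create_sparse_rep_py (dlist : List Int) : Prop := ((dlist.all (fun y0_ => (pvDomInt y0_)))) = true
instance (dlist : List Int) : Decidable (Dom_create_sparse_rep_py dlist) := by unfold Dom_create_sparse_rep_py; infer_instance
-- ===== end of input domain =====

-- B replaces A's per-index predecessor comparison by a run-grouping (groupby-style) traversal; same O(n) cost.

-- ===== PORT A =====
-- for i, m in enumerate(dlist): append 1 / compare m with dlist[i-1]
-- (dlist[i-1] is always in range, since that branch runs only for i ≥ 1; pyGetD is exact there)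
def create_sparse_rep_py (dlist : List Int) : List Int :=
  (PySem.List.enumerate dlist 0).foldl
    (fun n_sparse im =>
      if im.1 == 0 then n_sparse ++ [1]
      else if im.2 ≠ PySem.List.pyGetD dlist (im.1 - 1) 0 then n_sparse ++ [1]
      else n_sparse ++ [0])
    []

-- ===== PORT B =====
-- itertools.groupby: each maximal run of equal values yields 1 followed by (run length - 1) zeros
def pvAltGo : List Int → List Int
  | [] => []
  | x :: xs =>
    let run := xs.takeWhile (fun y => y == x)
    let rest := xs.dropWhile (fun y => y == x)
    (1 :: List.replicate run.length 0) ++ pvAltGo rest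
termination_by l => l.length
decreasing_by
  simpa using Nat.lt_succ_of_le (List.length_dropWhile_le _ _)

def create_sparse_rep_py_alt (dlist : List Int) : List Int := pvAltGo dlist

-- ===== PRECONDITION & SPEC =====
def Spec_create_sparse_rep_py (dlist : List Int) (out : List Int) : Prop := out = create_sparse_rep_py_alt dlist
instance (dlist : List Int) (out : List Int) : Decidable (Spec_create_sparse_rep_py dlist out) := by unfold Spec_create_sparse_rep_py; infer_instance

-- ===== CLAIM (what is proved, stated in full; the proofs are below) =====
def Claim_equal_create_sparse_rep_py : Prop := ∀ (dlist : List Int), Dom_create_sparse_rep_py dlist → Spec_create_sparse_rep_py dlist (create_sparse_rep_py dlist)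

-- ===== LEMMAS AND PROOFS =====

-- canonical form: 1 for the head, then a first-difference scan carrying the previous value
def pvCg (prev : Int) : List Int → List Int
  | [] => []
  | x :: xs => (if x ≠ prev then 1 else 0) :: pvCg x xs

-- the per-index body of A, mapped over the enumeration, is the first-difference scan
theorem pvA_map (pre : List Int) (prev : Int) (xs : List Int) :
    (PySem.List.enumerate xs ((pre.length : Int) + 1)).map
      (fun im => if im.1 == 0 then (1 : Int)
        else if im.2 ≠ PySem.List.pyGetD (pre ++ prev :: xs) (im.1 - 1) 0 then 1 else 0)
      = pvCg prev xs := by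
  induction xs generalizing pre prev with
  | nil => simp [PySem.List.enumerate_nil, pvCg]
  | cons x xs ih =>
    rw [PySem.List.enumerate_cons, List.map_cons]
    have h1 : ((pre.length : Int) + 1) ≠ 0 := by omega
    have h2 : ((pre.length : Int) + 1 - 1) = (pre.length : Nat) := by omega
    have h3 : PySem.List.pyGetD (pre ++ prev :: x :: xs) ((pre.length : Int) + 1 - 1) 0 = prev := by
      rw [h2, PySem.List.pyGetD_natCast]
      simp [List.getD]
    have h4 := ih (pre ++ [prev]) x
    have h5 : ((pre ++ [prev]).length : Int) + 1 = (pre.length : Int) + 1 + 1 := by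
      simp
    rw [h5] at h4
    simp only [List.append_assoc, List.cons_append, List.nil_append] at h4
    rw [h4]
    simp [pvCg, h1]

-- A equals the canonical form
theorem pvA_canon (dlist : List Int) :
    create_sparse_rep_py dlist =
      match dlist with
      | [] => []
      | x :: xs => 1 :: pvCg x xs := by
  unfold create_sparse_rep_py
  have hbody : (fun (n_sparse : List Int) (im : Int × Int) =>
      if im.1 == 0 then n_sparse ++ [1]
      else if im.2 ≠ PySem.List.pyGetD dlist (im.1 - 1) 0 then n_sparse ++ [1]
      else n_sparse ++ [0])
    = (fun n_sparse im => n_sparse ++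
        [if im.1 == 0 then (1 : Int)
         else if im.2 ≠ PySem.List.pyGetD dlist (im.1 - 1) 0 then 1 else 0]) := by
    funext a b; split_ifs <;> rfl
  rw [hbody, PySem.List.foldl_append_singleton_eq_map]
  cases dlist with
  | nil => simp [PySem.List.enumerate_nil]
  | cons x xs =>
    rw [PySem.List.enumerate_cons, List.map_cons]
    have := pvA_map [] x xs
    simp only [List.length_nil, Nat.cast_zero, List.nil_append, zero_add] at this
    rw [List.nil_append, show ((0:Int)+1) = 1 from rfl]
    show _ :: _ = 1 :: pvCg x xs
    exact congrArg₂ List.cons (by norm_num) this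

-- the scan distributes over a run of values equal to prev
theorem pvCg_run (l : List Int) (prev : Int) :
    pvCg prev l =
      List.replicate (l.takeWhile (fun y => y == prev)).length 0
        ++ pvCg prev (l.dropWhile (fun y => y == prev)) := by
  induction l with
  | nil => simp [pvCg]
  | cons x xs ih =>
    by_cases h : x = prev
    · subst h
      simp [List.takeWhile, List.dropWhile, pvCg, List.replicate_succ, ih]
    · have hb : (x == prev) = false := by simpa using h
      simp [List.takeWhile, List.dropWhile, hb, pvCg]

-- B equals the canonical form (induction on a length bound: pvAltGo recurses on a shorter suffix)
theorem pvB_canon_aux : ∀ (n : Nat) (dlist : List Int), dlist.length ≤ n →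
    pvAltGo dlist =
      (match dlist with
      | [] => []
      | x :: xs => 1 :: pvCg x xs) := by
  intro n
  induction n with
  | zero =>
    intro dlist h
    have : dlist = [] := List.eq_nil_of_length_eq_zero (Nat.le_zero.mp h)
    subst this
    simp [pvAltGo]
  | succ n ih =>
    intro dlist h
    cases dlist with
    | nil => simp [pvAltGo]
    | cons x xs =>
      rw [pvAltGo]
      simp only []
      rw [pvCg_run xs x]
      cases hrest : xs.dropWhile (fun y => y == x) with
      | nil => simp [pvAltGo, pvCg]
      | cons y ys =>
        have hy' : y ≠ x := by
          have := List.head?_dropWhile_not (fun y => y == x) xs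
          rw [hrest] at this
          simpa using this
        have hlen : (y :: ys).length ≤ n := by
          have := List.length_dropWhile_le (fun y => y == x) xs
          rw [hrest] at this
          simp only [List.length_cons] at h this ⊢
          omega
        rw [ih (y :: ys) hlen]
        simp [pvCg, hy']

theorem pvB_canon (dlist : List Int) :
    pvAltGo dlist =
      match dlist with
      | [] => []
      | x :: xs => 1 :: pvCg x xs :=
  pvB_canon_aux dlist.length dlist le_rfl

-- ===== VERDICT (by name: the statement is the Claim_ definition above) =====
theorem create_sparse_rep_py_spec : Claim_equal_create_sparse_rep_py := by
  intro dlist _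
  unfold Spec_create_sparse_rep_py create_sparse_rep_py_alt
  rw [pvA_canon, pvB_canon]
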